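-- pv_equiv track=rewrite | github.com/collinsgraciano/pg_online_book_copyright_music_online_update | audiobook_pipeline_runtime_core_v3_zh_tw_localized.py | _reset_split_part_upload_state
-- ===== SOURCE A (Python) =====
-- def _reset_split_part_upload_state(part_state, reason=""):
--     if not isinstance(part_state, dict):
--         return False
--
--     changed = False
--     for key in ["video_id", "youtube_url", "uploaded_at", "publish_at", "schedule_reason", "playlist_item_id"]:
--         if not str(part_state.get(key) or "").strip():
--             continue
--         part_state[key] = ""
--         changed = True
--
--     if str(part_state.get("status") or "").strip().lower() != "pending":
--         part_state["status"] = "pending"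
--         changed = True
--     if str(part_state.get("completed_at") or "").strip():
--         part_state["completed_at"] = ""
--         changed = True
--     if str(part_state.get("last_stage") or "").strip() != "upload_recovery_pending":
--         part_state["last_stage"] = "upload_recovery_pending"
--         changed = True
--
--     normalized_reason = str(reason or "").strip()
--     if str(part_state.get("error") or "").strip() != normalized_reason:
--         part_state["error"] = normalized_reason
--         changed = True
--
--     return changed
-- ===== SOURCE B (Python) =====
-- def _reset_split_part_upload_state(part_state, reason=""):
--     if not isinstance(part_state, dict):
--         return False
--
--     target = {
--         "video_id": "", "youtube_url": "", "uploaded_at": "", "publish_at": "",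
--         "schedule_reason": "", "playlist_item_id": "", "status": "pending",
--         "completed_at": "", "last_stage": "upload_recovery_pending",
--         "error": str(reason or "").strip(),
--     }
--     current = {k: str(part_state.get(k) or "").strip() for k in target}
--     current["status"] = current["status"].lower()
--     part_state.update(target)
--     return current != target
-- ===== Notes on version B (the rewrite author's own statement) =====
-- stated objective: alternative
-- what changed: B decouples decision from mutation: it snapshots the normalized current values into one dict, compares that snapshot against a target dict in a single dict-equality test to compute the return value, and bulk-resets all fields with one unconditional update, instead of A's sequential per-field compare-and-set with a changed flag.
import Mathlib
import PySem

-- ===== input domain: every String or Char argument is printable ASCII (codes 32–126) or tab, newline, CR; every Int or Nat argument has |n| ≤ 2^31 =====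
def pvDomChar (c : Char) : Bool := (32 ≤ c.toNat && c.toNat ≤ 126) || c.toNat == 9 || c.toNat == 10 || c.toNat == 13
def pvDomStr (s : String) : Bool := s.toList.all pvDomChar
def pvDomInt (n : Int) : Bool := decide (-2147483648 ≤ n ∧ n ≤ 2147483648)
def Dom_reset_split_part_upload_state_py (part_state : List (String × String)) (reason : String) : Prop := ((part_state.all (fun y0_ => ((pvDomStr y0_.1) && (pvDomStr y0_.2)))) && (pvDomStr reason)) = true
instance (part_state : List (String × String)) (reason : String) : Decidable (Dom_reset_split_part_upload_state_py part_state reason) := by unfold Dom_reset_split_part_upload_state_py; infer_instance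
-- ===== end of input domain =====

-- B computes the return value by one dict comparison of a normalized snapshot against a
-- target dict and resets all fields with one unconditional update, instead of A's
-- per-field compare-and-set with a changed flag. Both mutate part_state; A writes only
-- differing fields while B writes every target field, so the equivalence proved here is
-- about the RETURN value only.

-- ===== PORT A =====
def pvBlankKeys : List String :=
  ["video_id", "youtube_url", "uploaded_at", "publish_at", "schedule_reason", "playlist_item_id"]

-- str(part_state.get(key) or "").strip() ; values are strings, so 'or ""' is the identity on the getD result
def pvCur (d : PySem.Dict String String) (key : String) : String :=
  PySem.Str.strip (d.getD key "")

-- the body of A's first for-loop (blank a non-blank field)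
def pvAStep (st : PySem.Dict String String × Bool) (key : String) : PySem.Dict String String × Bool :=
  if pvCur st.1 key = "" then st else (st.1.insert key "", true)

def pvAStatus (st : PySem.Dict String String × Bool) : PySem.Dict String String × Bool :=
  if PySem.Str.lower (pvCur st.1 "status") ≠ "pending" then (st.1.insert "status" "pending", true) else st

def pvACompleted (st : PySem.Dict String String × Bool) : PySem.Dict String String × Bool :=
  if pvCur st.1 "completed_at" ≠ "" then (st.1.insert "completed_at" "", true) else st

def pvALastStage (st : PySem.Dict String String × Bool) : PySem.Dict String String × Bool :=
  if pvCur st.1 "last_stage" ≠ "upload_recovery_pending"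
  then (st.1.insert "last_stage" "upload_recovery_pending", true) else st

def pvAError (nr : String) (st : PySem.Dict String String × Bool) : PySem.Dict String String × Bool :=
  if pvCur st.1 "error" ≠ nr then (st.1.insert "error" nr, true) else st

def reset_split_part_upload_state_py (part_state : List (String × String)) (reason : String) : Bool :=
  -- isinstance(part_state, dict) is always true under the type convention
  (pvAError (PySem.Str.strip reason)
    (pvALastStage (pvACompleted (pvAStatus
      (pvBlankKeys.foldl pvAStep (PySem.Dict.mk part_state, false)))))).2

-- ===== PORT B =====
-- B's target dict, as its items in insertion order
def pvTargetItems (nr : String) : List (String × String) :=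
  [("video_id", ""), ("youtube_url", ""), ("uploaded_at", ""), ("publish_at", ""),
   ("schedule_reason", ""), ("playlist_item_id", ""), ("status", "pending"),
   ("completed_at", ""), ("last_stage", "upload_recovery_pending"), ("error", nr)]

-- Python's 'current != target' compares the dicts as maps; here both dicts have the same
-- keys in the same order (current is built by iterating target's keys), so it is exactly
-- inequality of the item lists.
def reset_split_part_upload_state_py_alt (part_state : List (String × String)) (reason : String) : Bool :=
  let target := pvTargetItems (PySem.Str.strip reason)
  let d := PySem.Dict.mk part_state
  let current0 := target.map (fun p => (p.1, PySem.Str.strip (d.getD p.1 "")))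
  let current := current0.map (fun p => if p.1 == "status" then (p.1, PySem.Str.lower p.2) else p)
  !(current == target)

-- ===== PRECONDITION & SPEC =====
def Spec_reset_split_part_upload_state_py (part_state : List (String × String)) (reason : String) (out : Bool) : Prop := out = reset_split_part_upload_state_py_alt part_state reason
instance (part_state : List (String × String)) (reason : String) (out : Bool) : Decidable (Spec_reset_split_part_upload_state_py part_state reason out) := by unfold Spec_reset_split_part_upload_state_py; infer_instance

-- ===== CLAIM =====
def Claim_equal_reset_split_part_upload_state_py : Prop := ∀ (part_state : List (String × String)) (reason : String), Dom_reset_split_part_upload_state_py part_state reason → Spec_reset_split_part_upload_state_py part_state reason (reset_split_part_upload_state_py part_state reason)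

-- ===== LEMMAS AND PROOFS =====

theorem pair_beq (k a b : String) : (((k, a) : String × String) == (k, b)) = (a == b) := by
  show (k == k && a == b) = (a == b)
  simp

theorem pvAStep_snd (st : PySem.Dict String String × Bool) (k : String) :
    (pvAStep st k).2 = (st.2 || !(pvCur st.1 k == "")) := by
  unfold pvAStep; split <;> simp_all

theorem pvAStep_cur (st : PySem.Dict String String × Bool) (k k' : String) (h : k' ≠ k) :
    pvCur (pvAStep st k).1 k' = pvCur st.1 k' := by
  unfold pvAStep pvCur; split
  · rfl
  · rw [PySem.Dict.getD_insert_of_ne _ _ _ h]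

theorem pvAStatus_snd (st : PySem.Dict String String × Bool) :
    (pvAStatus st).2 = (st.2 || !(PySem.Str.lower (pvCur st.1 "status") == "pending")) := by
  unfold pvAStatus; split <;> simp_all

theorem pvAStatus_cur (st : PySem.Dict String String × Bool) (k' : String) (h : k' ≠ "status") :
    pvCur (pvAStatus st).1 k' = pvCur st.1 k' := by
  unfold pvAStatus pvCur; split
  · rw [PySem.Dict.getD_insert_of_ne _ _ _ h]
  · rfl

theorem pvACompleted_snd (st : PySem.Dict String String × Bool) :
    (pvACompleted st).2 = (st.2 || !(pvCur st.1 "completed_at" == "")) := by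
  unfold pvACompleted; split <;> simp_all

theorem pvACompleted_cur (st : PySem.Dict String String × Bool) (k' : String) (h : k' ≠ "completed_at") :
    pvCur (pvACompleted st).1 k' = pvCur st.1 k' := by
  unfold pvACompleted pvCur; split
  · rw [PySem.Dict.getD_insert_of_ne _ _ _ h]
  · rfl

theorem pvALastStage_snd (st : PySem.Dict String String × Bool) :
    (pvALastStage st).2 = (st.2 || !(pvCur st.1 "last_stage" == "upload_recovery_pending")) := by
  unfold pvALastStage; split <;> simp_all

theorem pvALastStage_cur (st : PySem.Dict String String × Bool) (k' : String) (h : k' ≠ "last_stage") :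
    pvCur (pvALastStage st).1 k' = pvCur st.1 k' := by
  unfold pvALastStage pvCur; split
  · rw [PySem.Dict.getD_insert_of_ne _ _ _ h]
  · rfl

theorem pvAError_snd (nr : String) (st : PySem.Dict String String × Bool) :
    (pvAError nr st).2 = (st.2 || !(pvCur st.1 "error" == nr)) := by
  unfold pvAError; split <;> simp_all

-- ===== VERDICT =====
theorem reset_split_part_upload_state_py_spec : Claim_equal_reset_split_part_upload_state_py := by
  intro part_state reason _
  unfold Spec_reset_split_part_upload_state_py
  unfold reset_split_part_upload_state_py reset_split_part_upload_state_py_alt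
  simp only [pvBlankKeys, pvTargetItems, List.foldl_cons, List.foldl_nil, List.map_cons,
    List.map_nil]
  simp only [pvAError_snd, pvALastStage_snd, pvALastStage_cur, pvACompleted_snd,
    pvACompleted_cur, pvAStatus_snd, pvAStatus_cur, pvAStep_snd, pvAStep_cur,
    ne_eq, String.reduceEq, not_false_eq_true]
  simp [pair_beq, pvCur, Bool.not_and, Bool.or_assoc]
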